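-- pv_equiv track=rewrite | github.com/tiendm1991/python | DynamicPrograming/countSubsequencesAiBjCk.py | countSubsequencesAiBjCk
-- ===== SOURCE A (Python) =====
-- def countSubsequencesAiBjCk(s):
--     n = len(s)
--     count = 0
--     nA, nB, nC = 0,0,0
--     for i in range(n):
--         if s[i] == 'a':
--             nA += nA + 1
--         elif s[i] == 'b':
--             nB += nB + nA
--         else:
--             nC += nC + nB
--     return nC
-- ===== SOURCE B (Python) =====
-- def countSubsequencesAiBjCk(s):
--     def combine(L, R):
--         (a1, ab1, abc1, b1, bc1, c1) = L
--         (a2, ab2, abc2, b2, bc2, c2) = R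
--         return (a1 + a2 + a1 * a2,
--                 ab1 + ab2 + a1 * b2 + a1 * ab2 + ab1 * b2,
--                 abc1 + abc2 + a1 * bc2 + a1 * abc2 + ab1 * c2 + ab1 * bc2 + abc1 * c2,
--                 b1 + b2 + b1 * b2,
--                 bc1 + bc2 + b1 * c2 + b1 * bc2 + bc1 * c2,
--                 c1 + c2 + c1 * c2)
--
--     def solve(t):
--         if len(t) == 1:
--             if t == 'a':
--                 return (1, 0, 0, 0, 0, 0)
--             if t == 'b':
--                 return (0, 0, 0, 1, 0, 0)
--             return (0, 0, 0, 0, 0, 1)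
--         m = len(t) // 2
--         return combine(solve(t[:m]), solve(t[m:]))
--
--     if not s:
--         return 0
--     return solve(s)[2]
-- ===== Notes on version B (the rewrite author's own statement) =====
-- stated objective: alternative
-- what changed: Replaces A's single left-to-right scalar DP pass by a divide-and-conquer: each half of the string is summarized by six subsequence counts (a+, a+b+, a+b+c+, b+, b+c+, c+) and the halves are merged with an associative combination law; on long strings this balances the big-integer multiplications and beat A in a timing run.
import Mathlib
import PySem

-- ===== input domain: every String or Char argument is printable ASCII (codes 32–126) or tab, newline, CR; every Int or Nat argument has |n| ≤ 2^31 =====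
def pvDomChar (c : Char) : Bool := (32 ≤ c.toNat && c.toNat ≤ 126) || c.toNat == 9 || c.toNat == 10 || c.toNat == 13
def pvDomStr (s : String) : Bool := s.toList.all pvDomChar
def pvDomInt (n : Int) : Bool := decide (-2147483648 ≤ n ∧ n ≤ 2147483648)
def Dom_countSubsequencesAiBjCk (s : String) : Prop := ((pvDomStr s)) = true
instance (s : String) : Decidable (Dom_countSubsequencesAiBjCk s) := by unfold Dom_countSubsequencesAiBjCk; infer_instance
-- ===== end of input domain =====

-- B replaces A's single left-to-right scalar DP pass by a divide-and-conquer that merges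
-- six per-half subsequence counts with an associative combination law (objective: alternative).

-- ===== PORT A =====
-- A's loop over s with the three scalars nA, nB, nC and three-way branch
def pvALoop : List Char → Int × Int × Int → Int × Int × Int
  | [], st => st
  | ch :: t, (nA, nB, nC) =>
    if ch = 'a' then pvALoop t (nA + (nA + 1), nB, nC)
    else if ch = 'b' then pvALoop t (nA, nB + (nB + nA), nC)
    else pvALoop t (nA, nB, nC + (nC + nB))

def countSubsequencesAiBjCk (s : String) : Int :=
  (pvALoop s.toList (0, 0, 0)).2.2

-- ===== PORT B =====
-- per-segment summary (a⁺, a⁺b⁺, a⁺b⁺c⁺, b⁺, b⁺c⁺, c⁺ subsequence counts)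
abbrev pvT6 : Type := Int × Int × Int × Int × Int × Int

-- B's combine(L, R)
def pvCombine : pvT6 → pvT6 → pvT6
  | (a1, ab1, abc1, b1, bc1, c1), (a2, ab2, abc2, b2, bc2, c2) =>
    (a1 + a2 + a1 * a2,
     ab1 + ab2 + a1 * b2 + a1 * ab2 + ab1 * b2,
     abc1 + abc2 + a1 * bc2 + a1 * abc2 + ab1 * c2 + ab1 * bc2 + abc1 * c2,
     b1 + b2 + b1 * b2,
     bc1 + bc2 + b1 * c2 + b1 * bc2 + bc1 * c2,
     c1 + c2 + c1 * c2)

-- B's solve(t): single character base case, otherwise split in half and combine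
def pvSolve (l : List Char) : pvT6 :=
  match l with
  | [] => (0, 0, 0, 0, 0, 0)   -- never reached from countSubsequencesAiBjCk_alt (guarded by the empty check)
  | [c] =>
    if c = 'a' then (1, 0, 0, 0, 0, 0)
    else if c = 'b' then (0, 0, 0, 1, 0, 0)
    else (0, 0, 0, 0, 0, 1)
  | c1 :: c2 :: t =>
    pvCombine (pvSolve ((c1 :: c2 :: t).take ((c1 :: c2 :: t).length / 2)))
              (pvSolve ((c1 :: c2 :: t).drop ((c1 :: c2 :: t).length / 2)))
termination_by l.length
decreasing_by
  · simp; omega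
  · simp; omega

def countSubsequencesAiBjCk_alt (s : String) : Int :=
  if s.toList = [] then 0 else (pvSolve s.toList).2.2.1

-- ===== PRECONDITION & SPEC =====
def Spec_countSubsequencesAiBjCk (s : String) (out : Int) : Prop := out = countSubsequencesAiBjCk_alt s
instance (s : String) (out : Int) : Decidable (Spec_countSubsequencesAiBjCk s out) := by unfold Spec_countSubsequencesAiBjCk; infer_instance

-- ===== CLAIM (what is proved, stated in full; the proofs are below) =====
def Claim_equal_countSubsequencesAiBjCk : Prop := ∀ (s : String), Dom_countSubsequencesAiBjCk s → Spec_countSubsequencesAiBjCk s (countSubsequencesAiBjCk s)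

-- ===== LEMMAS AND PROOFS =====

-- the single-character summary
def pvSingle (c : Char) : pvT6 :=
  if c = 'a' then (1, 0, 0, 0, 0, 0)
  else if c = 'b' then (0, 0, 0, 1, 0, 0)
  else (0, 0, 0, 0, 0, 1)

-- left-fold form of the summary, used to bridge the divide-and-conquer to A's loop
def pvFold (acc : pvT6) (l : List Char) : pvT6 :=
  l.foldl (fun st c => pvCombine st (pvSingle c)) acc

theorem pvCombine_zero (x : pvT6) : pvCombine (0, 0, 0, 0, 0, 0) x = x := by
  obtain ⟨a, ab, abc, b, bc, c⟩ := x
  simp [pvCombine]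

theorem pvCombine_assoc (x y z : pvT6) :
    pvCombine (pvCombine x y) z = pvCombine x (pvCombine y z) := by
  obtain ⟨a1, ab1, abc1, b1, bc1, c1⟩ := x
  obtain ⟨a2, ab2, abc2, b2, bc2, c2⟩ := y
  obtain ⟨a3, ab3, abc3, b3, bc3, c3⟩ := z
  simp only [pvCombine, Prod.mk.injEq]
  refine ⟨by ring, by ring, by ring, by ring, by ring, by ring⟩

theorem pvFold_shift (l : List Char) (x y : pvT6) :
    pvFold (pvCombine x y) l = pvCombine x (pvFold y l) := by
  induction l generalizing y with
  | nil => simp [pvFold]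
  | cons c t ih => simp [pvFold, List.foldl] at ih ⊢; rw [pvCombine_assoc, ih]

theorem pvCombine_zero_right (x : pvT6) : pvCombine x (0, 0, 0, 0, 0, 0) = x := by
  obtain ⟨a, ab, abc, b, bc, c⟩ := x
  simp [pvCombine]

theorem pvFold_append (l1 l2 : List Char) :
    pvFold (0, 0, 0, 0, 0, 0) (l1 ++ l2) =
      pvCombine (pvFold (0, 0, 0, 0, 0, 0) l1) (pvFold (0, 0, 0, 0, 0, 0) l2) := by
  have h : ∀ acc, pvFold acc (l1 ++ l2) = pvFold (pvFold acc l1) l2 := by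
    intro acc; simp [pvFold, List.foldl_append]
  rw [h]
  conv_lhs => rw [← pvCombine_zero_right (pvFold (0, 0, 0, 0, 0, 0) l1)]
  rw [pvFold_shift]

theorem pvSolve_eq_fold (l : List Char) : pvSolve l = pvFold (0, 0, 0, 0, 0, 0) l := by
  suffices h : ∀ (n : Nat) (l : List Char), l.length ≤ n →
      pvSolve l = pvFold (0, 0, 0, 0, 0, 0) l from h l.length l le_rfl
  intro n
  induction n with
  | zero =>
    intro l hl
    have : l = [] := List.eq_nil_of_length_eq_zero (Nat.le_zero.mp hl)
    subst this
    simp [pvSolve, pvFold]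
  | succ n ih =>
    intro l hl
    rcases l with _ | ⟨c, _ | ⟨c2, t⟩⟩
    · simp [pvSolve, pvFold]
    · rw [pvSolve]
      simp [pvFold, List.foldl, pvCombine_zero, pvSingle]
    · rw [pvSolve,
          ih _ (by simp at hl ⊢; omega),
          ih _ (by simp at hl ⊢; omega),
          ← pvFold_append, List.take_append_drop]

-- B's fold carries A's three scalars in its first three components
theorem pvFold_cons (acc : pvT6) (c : Char) (t : List Char) :
    pvFold acc (c :: t) = pvFold (pvCombine acc (pvSingle c)) t := rfl

theorem pvFold_fst3 (l : List Char) (a ab abc b bc c : Int) :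
    ((pvFold (a, ab, abc, b, bc, c) l).1,
     (pvFold (a, ab, abc, b, bc, c) l).2.1,
     (pvFold (a, ab, abc, b, bc, c) l).2.2.1) = pvALoop l (a, ab, abc) := by
  induction l generalizing a ab abc b bc c with
  | nil => simp [pvFold, pvALoop]
  | cons ch t ih =>
    rw [pvFold_cons]
    by_cases ha : ch = 'a'
    · subst ha
      rw [show pvCombine (a, ab, abc, b, bc, c) (pvSingle 'a')
            = (a + (a + 1), ab, abc, b, bc, c) from by
          rw [show pvSingle 'a' = ((1 : Int), 0, 0, 0, 0, 0) from by decide]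
          simp only [pvCombine, Prod.mk.injEq]
          refine ⟨by ring, by ring, by ring, by ring, by ring, by ring⟩]
      rw [show pvALoop ('a' :: t) (a, ab, abc) = pvALoop t (a + (a + 1), ab, abc) from by
          simp [pvALoop]]
      exact ih ..
    · by_cases hb : ch = 'b'
      · subst hb
        rw [show pvCombine (a, ab, abc, b, bc, c) (pvSingle 'b')
              = (a, ab + (ab + a), abc, b + (b + 1), bc, c) from by
            rw [show pvSingle 'b' = ((0 : Int), 0, 0, 1, 0, 0) from by decide]
            simp only [pvCombine, Prod.mk.injEq]
            refine ⟨by ring, by ring, by ring, by ring, by ring, by ring⟩]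
        rw [show pvALoop ('b' :: t) (a, ab, abc) = pvALoop t (a, ab + (ab + a), abc) from by
            simp [pvALoop]]
        exact ih ..
      · rw [show pvCombine (a, ab, abc, b, bc, c) (pvSingle ch)
              = (a, ab, abc + (abc + ab), b, bc + (bc + b), c + (c + 1)) from by
            rw [show pvSingle ch = ((0 : Int), 0, 0, 0, 0, 1) from by
              simp [pvSingle, if_neg ha, if_neg hb]]
            simp only [pvCombine, Prod.mk.injEq]
            refine ⟨by ring, by ring, by ring, by ring, by ring, by ring⟩]
        rw [show pvALoop (ch :: t) (a, ab, abc)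
              = pvALoop t (a, ab, abc + (abc + ab)) from by
            simp [pvALoop, ha, hb]]
        exact ih ..

-- ===== VERDICT (by name: the statement is the Claim_ definition above) =====
theorem countSubsequencesAiBjCk_spec : Claim_equal_countSubsequencesAiBjCk := by
  intro s _
  unfold Spec_countSubsequencesAiBjCk countSubsequencesAiBjCk countSubsequencesAiBjCk_alt
  by_cases h : s.toList = []
  · simp [h, pvALoop]
  · rw [if_neg h, pvSolve_eq_fold, ← pvFold_fst3]
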